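-- pv_equiv track=rewrite | github.com/ormai/notes | fondamenti-di-programmazione-1/domjudge/ES1.py | sec
-- ===== SOURCE A (Python) =====
-- def sec(N, M):
--     ran = []
--     for i in range(1, N):
--         ran.append(i)
--
--     for i in ran:
--         if numeroDivisori(i) == M:
--             return True
--
--     return False
--
-- def numeroDivisori(n):
--     cont = 0
--     for i in range(1, n + 1):
--         if n % i == 0:
--             cont += 1
--
--     return cont
-- ===== SOURCE B (Python) =====
-- def sec(N, M):
--     return any(_num_divisors(i) == M for i in range(1, N))
--
-- def _num_divisors(n):
--     cnt = 0
--     d = 1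
--     while d * d <= n:
--         if n % d == 0:
--             cnt += 1 if d * d == n else 2
--         d += 1
--     return cnt
-- ===== Notes on version B (the rewrite author's own statement) =====
-- stated objective: faster
-- what changed: A counts divisors of each candidate i by scanning all of 1..i (O(N^2) total); B counts divisors by trial division only up to sqrt(i), adding 2 per divisor pair (1 for an exact square root), and tests candidates with any() over a generator.
import Mathlib
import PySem

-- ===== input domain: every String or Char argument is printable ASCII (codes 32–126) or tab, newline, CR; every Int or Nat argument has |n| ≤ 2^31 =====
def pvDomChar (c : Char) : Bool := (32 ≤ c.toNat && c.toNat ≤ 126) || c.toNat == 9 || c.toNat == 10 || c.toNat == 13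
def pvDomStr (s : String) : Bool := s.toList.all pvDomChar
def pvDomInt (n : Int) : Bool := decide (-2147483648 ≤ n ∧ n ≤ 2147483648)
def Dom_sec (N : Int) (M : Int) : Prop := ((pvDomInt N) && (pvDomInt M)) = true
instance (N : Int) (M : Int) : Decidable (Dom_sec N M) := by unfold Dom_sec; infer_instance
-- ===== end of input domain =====

-- B replaces A's full 1..n divisor scan per candidate by trial division up to √n
-- counting divisor pairs; the return values are identical.

-- ===== PORT A =====
def numeroDivisori (n : Int) : Int :=
  (PySem.List.pyRange 1 (n + 1) 1).foldl
    (fun cont i => if PySem.Int.mod n i == 0 then cont + 1 else cont) 0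

def secGo (M : Int) : List Int → Bool
  | [] => false
  | i :: rest => if numeroDivisori i == M then true else secGo M rest

def sec (N : Int) (M : Int) : Bool :=
  let ran : List Int := (PySem.List.pyRange 1 N 1).foldl (fun acc i => acc ++ [i]) []
  secGo M ran

-- ===== PORT B =====
-- fuel = remaining iterations of the while loop (d*d ≤ n and d ≥ 1 force d ≤ n,
-- so (n + 1 - d).toNat steps always suffice); it only makes the recursion structural.
def countDivGoFuel : Nat → Int → Int → Int → Int
  | 0, _, _, cnt => cnt
  | fuel + 1, n, d, cnt =>
    if d * d ≤ n then
      countDivGoFuel fuel n (d + 1)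
        (if PySem.Int.mod n d == 0 then (if d * d == n then cnt + 1 else cnt + 2) else cnt)
    else cnt

def countDivGo (n d cnt : Int) : Int := countDivGoFuel (n + 1 - d).toNat n d cnt

def sec_alt (N : Int) (M : Int) : Bool :=
  (PySem.List.pyRange 1 N 1).any (fun i => countDivGo i 1 0 == M)

-- ===== PRECONDITION & SPEC =====
def Spec_sec (N : Int) (M : Int) (out : Bool) : Prop := out = sec_alt N M
instance (N : Int) (M : Int) (out : Bool) : Decidable (Spec_sec N M out) := by unfold Spec_sec; infer_instance

-- ===== CLAIM (what is proved, stated in full; the proofs are below) =====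
def Claim_equal_sec : Prop := ∀ (N : Int) (M : Int), Dom_sec N M → Spec_sec N M (sec N M)

-- ===== LEMMAS AND PROOFS =====

-- weight of j in the √-bounded divisor count of m: a divisor j below the square
-- root counts for itself and its cofactor m / j, except the exact square root.
def divWeight (m j : ℕ) : ℕ := if j ∣ m then (if j * j = m then 1 else 2) else 0

-- B's loop accumulates the weights of all j from d up to √m (fuel suffices).
lemma countDivGo_sum (m : ℕ) :
    ∀ (k d : ℕ) (cnt : Int), 1 ≤ d → Nat.sqrt m + 1 - d ≤ k →
      countDivGoFuel k (m : Int) (d : Int) cnt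
        = cnt + ↑(∑ j ∈ Finset.Ico d (Nat.sqrt m + 1), divWeight m j) := by
  intro k
  induction k with
  | zero =>
    intro d cnt hd hk
    rw [countDivGoFuel]
    simp [Finset.Ico_eq_empty_of_le (by omega : Nat.sqrt m + 1 ≤ d)]
  | succ k ih =>
    intro d cnt hd hk
    by_cases hdm : d * d ≤ m
    · have hds : d ≤ Nat.sqrt m := Nat.le_sqrt.mpr hdm
      have hcond : ((d : Int) * (d : Int) ≤ (m : Int)) := by exact_mod_cast hdm
      rw [countDivGoFuel]
      simp only [hcond, if_true]
      set cnt' := (if (PySem.Int.mod (m : Int) (d : Int) == 0) = true then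
          (if ((d : Int) * (d : Int) == (m : Int)) = true then cnt + 1 else cnt + 2)
          else cnt) with hcnt'
      have hrec := ih (d + 1) cnt' (by omega) (by omega)
      push_cast at hrec
      rw [hrec, Finset.sum_eq_sum_Ico_succ_bot (show d < Nat.sqrt m + 1 by omega)]
      have hw : cnt' = cnt + (divWeight m d : Int) := by
        rw [hcnt']
        have hmod : PySem.Int.mod (m : Int) (d : Int) = ((m % d : ℕ) : Int) :=
          PySem.Int.mod_natCast m d
        have hsq : (((d : Int) * (d : Int) == (m : Int)) = true) ↔ d * d = m := by
          rw [beq_iff_eq]; exact_mod_cast Iff.rfl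
        by_cases hdvd : d ∣ m
        · have h0 : m % d = 0 := Nat.mod_eq_zero_of_dvd hdvd
          by_cases hss : d * d = m
          · simp [divWeight, hdvd, hss, hmod, h0, hsq]
          · simp [divWeight, hdvd, hss, hmod, h0, hsq]
        · have h0 : m % d ≠ 0 := fun h => hdvd (Nat.dvd_of_mod_eq_zero h)
          have hfalse : ¬ ((PySem.Int.mod (m : Int) (d : Int) == 0) = true) := by
            rw [hmod, beq_iff_eq]
            exact_mod_cast h0
          rw [if_neg hfalse]
          simp [divWeight, hdvd]
      rw [hw]
      push_cast
      ring
    · have hnot : ¬ ((d : Int) * (d : Int) ≤ (m : Int)) := by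
        intro hle; exact hdm (by exact_mod_cast hle)
      have hs : Nat.sqrt m < d := by
        by_contra hle
        exact hdm (Nat.le_sqrt.mp (by omega))
      rw [countDivGoFuel]
      simp [hnot, Finset.Ico_eq_empty_of_le (by omega : Nat.sqrt m + 1 ≤ d)]

-- the √-bounded weighted count equals the number of divisors of m in [1, m]:
-- the divisors above √m are exactly the cofactors m / j of the divisors j < √m.
lemma sqrtSum_eq_card (m : ℕ) (hm : 1 ≤ m) :
    ∑ j ∈ Finset.Ico 1 (Nat.sqrt m + 1), divWeight m j
      = ((Finset.Ico 1 (m + 1)).filter (fun d => d ∣ m)).card := by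
  have h1 : ∑ j ∈ Finset.Ico 1 (Nat.sqrt m + 1), divWeight m j
      = ∑ j ∈ (Finset.Ico 1 (Nat.sqrt m + 1)).filter (fun d => d ∣ m),
          (if j * j = m then 1 else 2) := by
    rw [Finset.sum_filter]
    exact Finset.sum_congr rfl (fun j _ => rfl)
  have h2 : ∑ j ∈ (Finset.Ico 1 (Nat.sqrt m + 1)).filter (fun d => d ∣ m),
        (if j * j = m then 1 else 2)
      = ((Finset.Ico 1 (Nat.sqrt m + 1)).filter (fun d => d ∣ m)).card
        + (((Finset.Ico 1 (Nat.sqrt m + 1)).filter (fun d => d ∣ m)).filter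
            (fun j => ¬ j * j = m)).card := by
    have hsplit : ∀ j ∈ (Finset.Ico 1 (Nat.sqrt m + 1)).filter (fun d => d ∣ m),
        (if j * j = m then 1 else 2) = 1 + (if ¬ j * j = m then 1 else 0) := by
      intro j _; by_cases h : j * j = m <;> simp [h]
    rw [Finset.sum_congr rfl hsplit, Finset.sum_add_distrib, Finset.sum_const, smul_eq_mul,
        mul_one]
    congr 1
    exact (Finset.card_filter _ _).symm
  have h3 : (((Finset.Ico 1 (Nat.sqrt m + 1)).filter (fun d => d ∣ m)).filter
        (fun j => ¬ j * j = m)).card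
      = (((Finset.Ico 1 (m + 1)).filter (fun d => d ∣ m)).filter
          (fun j => ¬ j * j ≤ m)).card := by
    apply Finset.card_nbij' (fun j => m / j) (fun j => m / j)
    · intro j hj
      simp only [Finset.mem_coe, Finset.mem_filter, Finset.mem_Ico] at hj ⊢
      obtain ⟨⟨⟨hj1, hjs⟩, hjd⟩, hjne⟩ := hj
      have hjj : j * j ≤ m := Nat.le_sqrt.mp (by omega)
      have hjlt : j * j < m := lt_of_le_of_ne hjj hjne
      have he : m / j * j = m := Nat.div_mul_cancel hjd
      have he1 : 1 ≤ m / j := (Nat.one_le_div_iff (by omega)).mpr (Nat.le_of_dvd (by omega) hjd)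
      have hjlt2 : j < m / j := by nlinarith
      have hle : m / j ≤ m := Nat.div_le_self m j
      exact ⟨⟨⟨he1, by omega⟩, Nat.div_dvd_of_dvd hjd⟩, by nlinarith⟩
    · intro e he
      simp only [Finset.mem_coe, Finset.mem_filter, Finset.mem_Ico] at he ⊢
      obtain ⟨⟨⟨he1, hem⟩, hed⟩, hee⟩ := he
      have hgt : m < e * e := by omega
      have hj : m / e * e = m := Nat.div_mul_cancel hed
      have hj1 : 1 ≤ m / e := (Nat.one_le_div_iff (by omega)).mpr (Nat.le_of_dvd (by omega) hed)
      have hlt : m / e < e := by nlinarith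
      have hjj : m / e * (m / e) < m := by nlinarith
      have hjs : m / e ≤ Nat.sqrt m := Nat.le_sqrt.mpr (by omega)
      exact ⟨⟨⟨hj1, by omega⟩, Nat.div_dvd_of_dvd hed⟩, by omega⟩
    · intro j hj
      simp only [Finset.mem_coe, Finset.mem_filter, Finset.mem_Ico] at hj
      exact Nat.div_div_self hj.1.2 (by omega)
    · intro e he
      simp only [Finset.mem_coe, Finset.mem_filter, Finset.mem_Ico] at he
      exact Nat.div_div_self he.1.2 (by omega)
  have h4 : ((Finset.Ico 1 (m + 1)).filter (fun d => d ∣ m)).filter (fun j => j * j ≤ m)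
      = (Finset.Ico 1 (Nat.sqrt m + 1)).filter (fun d => d ∣ m) := by
    ext j
    simp only [Finset.mem_filter, Finset.mem_Ico]
    constructor
    · rintro ⟨⟨⟨hj1, hjm⟩, hjd⟩, hjj⟩
      exact ⟨⟨hj1, by have := Nat.le_sqrt.mpr hjj; omega⟩, hjd⟩
    · rintro ⟨⟨hj1, hjs⟩, hjd⟩
      have hjj : j * j ≤ m := Nat.le_sqrt.mp (by omega)
      exact ⟨⟨⟨hj1, by have := Nat.le_of_dvd (by omega) hjd; omega⟩, hjd⟩, hjj⟩
  have h5 := Finset.card_filter_add_card_filter_not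
    (s := (Finset.Ico 1 (m + 1)).filter (fun d => d ∣ m)) (p := fun j => j * j ≤ m)
  rw [h4] at h5
  rw [h1, h2, h3]
  omega

lemma countP_range_card (j : ℕ) (p : ℕ → Prop) [DecidablePred p] :
    (List.range j).countP (fun k => decide (p k)) = ((Finset.range j).filter p).card := by
  induction j with
  | zero => simp
  | succ j ih =>
    rw [List.range_succ, List.countP_append, Finset.range_add_one, Finset.filter_insert]
    by_cases hp : p j
    · rw [if_pos hp, Finset.card_insert_of_notMem (by simp)]
      simp [hp, ih]
    · rw [if_neg hp]
      simp [hp, ih]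

-- A's inner loop counts the divisors of m in [1, m].
lemma numeroDivisori_eq_card (m : ℕ) :
    numeroDivisori (m : Int) = ((Finset.Ico 1 (m + 1)).filter (fun d => d ∣ m)).card := by
  unfold numeroDivisori
  rw [PySem.List.foldl_count_if, PySem.List.pyRange_one]
  have hlen : (((m : ℕ) : Int) + 1 - 1).toNat = m := by omega
  have key : List.countP (fun i => PySem.Int.mod ((m : ℕ) : Int) i == 0)
        (List.map (fun k : ℕ => (1 : Int) + ↑k) (List.range ((((m : ℕ) : Int) + 1 - 1).toNat)))
      = ((Finset.range m).filter (fun k => (k + 1) ∣ m)).card := by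
    rw [hlen, List.countP_map, ← countP_range_card]
    apply List.countP_congr
    intro k _
    simp only [Function.comp_apply]
    have h1 : (1 : Int) + (k : Int) = ((1 + k : ℕ) : Int) := by push_cast; ring
    rw [h1, PySem.Int.mod_natCast]
    by_cases hdvd : (k + 1) ∣ m
    · have h0 : m % (1 + k) = 0 := Nat.mod_eq_zero_of_dvd (by rwa [Nat.add_comm 1 k])
      simp [h0, hdvd]
    · have h0 : m % (1 + k) ≠ 0 := fun h =>
        hdvd (by rw [Nat.add_comm 1 k] at h; exact Nat.dvd_of_mod_eq_zero h)
      constructor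
      · intro hb
        exact absurd (by exact_mod_cast (beq_iff_eq.mp hb) : m % (1 + k) = 0) h0
      · intro hb
        exact absurd (of_decide_eq_true hb) hdvd
  rw [key]
  have hbij : ((Finset.range m).filter (fun k => (k + 1) ∣ m)).card
      = ((Finset.Ico 1 (m + 1)).filter (fun d => d ∣ m)).card := by
    apply Finset.card_nbij' (fun k => k + 1) (fun d => d - 1)
    · intro k hk
      simp only [Finset.mem_coe, Finset.mem_filter, Finset.mem_range, Finset.mem_Ico] at hk ⊢
      exact ⟨⟨by omega, by omega⟩, hk.2⟩
    · intro d hd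
      simp only [Finset.mem_coe, Finset.mem_filter, Finset.mem_range, Finset.mem_Ico] at hd ⊢
      obtain ⟨⟨hd1, hdm⟩, hdd⟩ := hd
      constructor
      · omega
      · have : d - 1 + 1 = d := by omega
        rwa [this]
    · intro k hk
      simp
    · intro d hd
      simp only [Finset.mem_coe, Finset.mem_filter, Finset.mem_Ico] at hd
      show d - 1 + 1 = d
      omega
  rw [hbij]
  simp

lemma inner_eq (i : Int) (hi : 1 ≤ i) : numeroDivisori i = countDivGo i 1 0 := by
  obtain ⟨m, rfl⟩ : ∃ m : ℕ, i = (m : Int) := ⟨i.toNat, (Int.toNat_of_nonneg (by omega)).symm⟩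
  have hm : 1 ≤ m := by exact_mod_cast hi
  have hfuel : (((m : ℕ) : Int) + 1 - 1).toNat = m := by omega
  have h := countDivGo_sum m m 1 0 le_rfl (by have := Nat.sqrt_le_self m; omega)
  rw [Nat.cast_one] at h
  rw [numeroDivisori_eq_card]
  unfold countDivGo
  rw [hfuel, h, ← sqrtSum_eq_card m hm, zero_add]

lemma secGo_any (M : Int) (l : List Int) (hl : ∀ i ∈ l, 1 ≤ i) :
    secGo M l = l.any (fun i => countDivGo i 1 0 == M) := by
  induction l with
  | nil => rfl
  | cons i rest ih =>
    rw [secGo, List.any_cons, inner_eq i (hl i (by simp)),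
        ih (fun j hj => hl j (by simp [hj]))]
    cases countDivGo i 1 0 == M <;> simp


-- ===== VERDICT (by name: the statement is the Claim_ definition above) =====
theorem sec_spec : Claim_equal_sec := by
  intro N M _
  unfold Spec_sec sec sec_alt
  rw [PySem.List.foldl_append_singleton, List.nil_append]
  exact secGo_any M _ (fun i hi => (PySem.List.mem_pyRange_one.mp hi).1)
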